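-- pv_equiv track=rewrite | github.com/R-r632/Project-Files | Loan Status Prediction/coded2.py | solve
-- ===== SOURCE A (Python) =====
-- def solve(Q, Queries):
--     MAX_X = 10 ** 6 + 1
--     steps = [0] * MAX_X
--     prefix_steps = [0] * MAX_X
--
--     for x in range(1, MAX_X):
--         x_new = (x + 2) // 4  # Rounding off to the nearest integer
--         steps[x] = steps[x_new] + 1
--         prefix_steps[x] = prefix_steps[x - 1] + steps[x] + 1
--
--     result = []
--     for L, R in Queries:
--         total_steps = prefix_steps[R] - prefix_steps[L - 1] - 2
--         result.append(total_steps)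
--     return result
-- ===== SOURCE B (Python) =====
-- def solve(Q, Queries):
--     MAX_X = 10 ** 6 + 1
--     # steps(x) defined by steps(x) = steps((x+2)//4) + 1, steps(0) = 0, increases by 1
--     # exactly when x reaches a threshold of the sequence 1, 2, 6, 22, ... (b -> 4*b - 2),
--     # so it equals the number of thresholds <= x.  Fill the prefix table in one sweep
--     # with a running threshold counter instead of tabulating steps[] via the recurrence.
--     prefix = [0] * MAX_X
--     count = 0
--     next_threshold = 1
--     acc = 0
--     for x in range(1, MAX_X):
--         if x == next_threshold:
--             count += 1
--             next_threshold = 4 * next_threshold - 2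
--         acc += count + 1
--         prefix[x] = acc
--     return [prefix[R] - prefix[L - 1] - 2 for L, R in Queries]
-- ===== Notes on version B (the rewrite author's own statement) =====
-- stated objective: faster
-- what changed: B drops A's steps[] table and its recurrence steps[(x+2)//4]+1 entirely: since steps(x) increases by 1 exactly at the thresholds 1, 2, 6, 22, ... (b -> 4*b-2), B fills the single prefix table in one sweep with a running threshold counter (one comparison and one write per x instead of a floor division, two reads and two writes), answering queries from that one table.
import Mathlib
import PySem

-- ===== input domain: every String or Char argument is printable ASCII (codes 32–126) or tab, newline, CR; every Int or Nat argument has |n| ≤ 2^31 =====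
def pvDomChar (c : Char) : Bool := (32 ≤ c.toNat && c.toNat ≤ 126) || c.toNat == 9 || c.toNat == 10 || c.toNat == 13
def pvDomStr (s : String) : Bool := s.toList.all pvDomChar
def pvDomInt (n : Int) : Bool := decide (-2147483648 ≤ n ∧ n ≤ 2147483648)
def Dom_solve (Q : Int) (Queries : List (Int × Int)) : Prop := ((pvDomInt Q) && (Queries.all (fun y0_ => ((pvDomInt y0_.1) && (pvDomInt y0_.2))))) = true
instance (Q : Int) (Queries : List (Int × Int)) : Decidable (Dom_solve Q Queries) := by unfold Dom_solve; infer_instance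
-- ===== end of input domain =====

-- B drops A's steps[] table and its recurrence steps[(x+2)//4]+1: it fills the one
-- prefix table in a single sweep with a running counter of the thresholds
-- 1, 2, 6, 22, … (b → 4b−2), which is faster by a constant factor.

-- ===== PORT A =====
-- Python list indexing a[i] (negative i counts from the end); both Pythons index
-- their tables this way, so both ports use this helper. The out-of-range case is
-- IndexError, excluded by Pre_solve and unreachable inside the table-building loops.
def pyArrGet (a : Array Int) (i : Int) : Int :=
  let j : Int := if i < 0 then i + a.size else i
  if 0 ≤ j ∧ j < (a.size : Int) then a.getD j.toNat 0 else 0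

-- Python list assignment a[i] = v (negative i from the end); out of range never occurs
-- in either builder loop (indices 1..10^6 into arrays of size 10^6+1).
def pyArrSet (a : Array Int) (i : Int) (v : Int) : Array Int :=
  a.setIfInBounds (if i < 0 then i + (a.size : Int) else i).toNat v

-- one iteration of A's table-building loop body
def solveStep (sp : Array Int × Array Int) (x : Int) : Array Int × Array Int :=
  match sp with
  | (steps, pre) =>
    let xnew := PySem.Int.floordiv (x + 2) 4
    let steps' := pyArrSet steps x (pyArrGet steps xnew + 1)
    let pre' := pyArrSet pre x (pyArrGet pre (x - 1) + pyArrGet steps' x + 1)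
    (steps', pre')

def solve (Q : Int) (Queries : List (Int × Int)) : List Int :=
  let MAXX : Int := 10 ^ 6 + 1
  let steps0 : Array Int := Array.replicate 1000001 0   -- [0] * MAX_X
  let pre0 : Array Int := Array.replicate 1000001 0     -- [0] * MAX_X
  let sp := (PySem.List.pyRange 1 MAXX 1).foldl solveStep (steps0, pre0)
  Queries.foldl (fun result q =>
    result ++ [pyArrGet sp.2 q.2 - pyArrGet sp.2 (q.1 - 1) - 2]) []

-- ===== PORT B =====
-- one iteration of Source B's sweep: state (prefix, count, next_threshold, acc)
def altStep (st : Array Int × Int × Int × Int) (x : Int) : Array Int × Int × Int × Int :=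
  match st with
  | (a, count, next, acc) =>
    let cn := if x == next then (count + 1, 4 * next - 2) else (count, next)
    let acc' := acc + cn.1 + 1
    (pyArrSet a x acc', cn.1, cn.2, acc')

def solve_alt (Q : Int) (Queries : List (Int × Int)) : List Int :=
  let MAXX : Int := 10 ^ 6 + 1
  let st := (PySem.List.pyRange 1 MAXX 1).foldl altStep
    (Array.replicate 1000001 0, 0, 1, 0)   -- prefix = [0]*MAX_X; count = 0; next_threshold = 1; acc = 0
  Queries.map (fun q => pyArrGet st.1 q.2 - pyArrGet st.1 (q.1 - 1) - 2)

-- ===== PRECONDITION & SPEC =====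
-- Pre_solve: exactly the inputs on which A returns normally — both table lookups
-- prefix_steps[L-1] and prefix_steps[R] are in Python range for the 10^6+1-sized
-- table (otherwise A raises IndexError).
def Pre_solve (Q : Int) (Queries : List (Int × Int)) : Prop :=
  ∀ q ∈ Queries, -(10 ^ 6 + 1) ≤ q.1 - 1 ∧ q.1 - 1 ≤ 10 ^ 6 ∧
    -(10 ^ 6 + 1) ≤ q.2 ∧ q.2 ≤ 10 ^ 6
instance (Q : Int) (Queries : List (Int × Int)) : Decidable (Pre_solve Q Queries) := by
  unfold Pre_solve; infer_instance
def pvWitness_solve : Int × (List (Int × Int)) := (1, [(1, 5), (3, 10)])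

def Spec_solve (Q : Int) (Queries : List (Int × Int)) (out : List Int) : Prop := out = solve_alt Q Queries
instance (Q : Int) (Queries : List (Int × Int)) (out : List Int) : Decidable (Spec_solve Q Queries out) := by unfold Spec_solve; infer_instance

-- ===== CLAIM (what is proved, stated in full; the proofs are below) =====
def Claim_equal_solve : Prop := ∀ (Q : Int) (Queries : List (Int × Int)), Dom_solve Q Queries → Pre_solve Q Queries → Spec_solve Q Queries (solve Q Queries)

-- ===== LEMMAS AND PROOFS =====

-- mathematical step function: steps(0) = 0, steps(x) = steps((x+2)/4) + 1
def stepsF (x : Nat) : Int :=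
  if x = 0 then 0 else stepsF ((x + 2) / 4) + 1
  termination_by x
  decreasing_by omega

-- mathematical prefix: prefF n = Σ_{x=1..n} (steps(x) + 1)
def prefF : Nat → Int
  | 0 => 0
  | n + 1 => prefF n + stepsF (n + 1) + 1

-- B's threshold sequence 1, 2, 6, 22, …
def bseq : Nat → Int
  | 0 => 1
  | k + 1 => 4 * bseq k - 2

def bpsLit : List Int := [1, 2, 6, 22, 86, 342, 1366, 5462, 21846, 87382, 349526]

def cntL (l : List Int) (y : Int) : Int := (l.map (fun b => if b ≤ y then (1 : Int) else 0)).sum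

-- the bracket shift: 4c-2 ≤ x ↔ c ≤ (x+2)//4
lemma bracket (c x x' : Int) (h1 : 4 * x' ≤ x + 2) (h2 : x + 2 < 4 * x' + 4) :
    (if 4 * c - 2 ≤ x then (1 : Int) else 0) = if c ≤ x' then 1 else 0 := by
  split_ifs <;> omega

lemma cnt_rec (x : Nat) (hx1 : 1 ≤ x) (hx2 : x ≤ 1000000) :
    cntL bpsLit (x : Int) = cntL bpsLit (((x + 2) / 4 : Nat) : Int) + 1 := by
  set x' : Int := (((x + 2) / 4 : Nat) : Int) with hx'
  have hb1 : 4 * x' ≤ (x : Int) + 2 := by omega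
  have hb2 : (x : Int) + 2 < 4 * x' + 4 := by omega
  have e2 : (if (2:Int) ≤ (x:Int) then (1:Int) else 0) = if (1:Int) ≤ x' then 1 else 0 := by
    rw [show (2:Int) = 4 * 1 - 2 by ring]; exact bracket 1 _ _ hb1 hb2
  have e6 : (if (6:Int) ≤ (x:Int) then (1:Int) else 0) = if (2:Int) ≤ x' then 1 else 0 := by
    rw [show (6:Int) = 4 * 2 - 2 by ring]; exact bracket 2 _ _ hb1 hb2
  have e22 : (if (22:Int) ≤ (x:Int) then (1:Int) else 0) = if (6:Int) ≤ x' then 1 else 0 := by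
    rw [show (22:Int) = 4 * 6 - 2 by ring]; exact bracket 6 _ _ hb1 hb2
  have e86 : (if (86:Int) ≤ (x:Int) then (1:Int) else 0) = if (22:Int) ≤ x' then 1 else 0 := by
    rw [show (86:Int) = 4 * 22 - 2 by ring]; exact bracket 22 _ _ hb1 hb2
  have e342 : (if (342:Int) ≤ (x:Int) then (1:Int) else 0) = if (86:Int) ≤ x' then 1 else 0 := by
    rw [show (342:Int) = 4 * 86 - 2 by ring]; exact bracket 86 _ _ hb1 hb2
  have e1366 : (if (1366:Int) ≤ (x:Int) then (1:Int) else 0) = if (342:Int) ≤ x' then 1 else 0 := by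
    rw [show (1366:Int) = 4 * 342 - 2 by ring]; exact bracket 342 _ _ hb1 hb2
  have e5462 : (if (5462:Int) ≤ (x:Int) then (1:Int) else 0) = if (1366:Int) ≤ x' then 1 else 0 := by
    rw [show (5462:Int) = 4 * 1366 - 2 by ring]; exact bracket 1366 _ _ hb1 hb2
  have e21846 : (if (21846:Int) ≤ (x:Int) then (1:Int) else 0) = if (5462:Int) ≤ x' then 1 else 0 := by
    rw [show (21846:Int) = 4 * 5462 - 2 by ring]; exact bracket 5462 _ _ hb1 hb2
  have e87382 : (if (87382:Int) ≤ (x:Int) then (1:Int) else 0) = if (21846:Int) ≤ x' then 1 else 0 := by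
    rw [show (87382:Int) = 4 * 21846 - 2 by ring]; exact bracket 21846 _ _ hb1 hb2
  have e349526 : (if (349526:Int) ≤ (x:Int) then (1:Int) else 0) = if (87382:Int) ≤ x' then 1 else 0 := by
    rw [show (349526:Int) = 4 * 87382 - 2 by ring]; exact bracket 87382 _ _ hb1 hb2
  simp only [cntL, bpsLit, List.map_cons, List.map_nil, List.sum_cons, List.sum_nil]
  rw [e2, e6, e22, e86, e342, e1366, e5462, e21846, e87382, e349526,
      if_pos (show (1:Int) ≤ (x:Int) by omega),
      if_neg (show ¬ (349526:Int) ≤ x' by omega)]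
  ring

lemma stepsF_eq_cnt : ∀ x : Nat, 1 ≤ x → x ≤ 1000000 → stepsF x = cntL bpsLit (x : Int) := by
  intro x
  induction x using Nat.strong_induction_on with
  | _ x ih =>
    intro h1 h2
    rw [stepsF, if_neg (by omega), cnt_rec x h1 h2]
    by_cases hx : x = 1
    · subst hx
      norm_num
      rw [stepsF]
      norm_num [cntL, bpsLit]
    · rw [ih ((x + 2) / 4) (by omega) (by omega) (by omega)]

lemma bseq_pos : ∀ k : Nat, 1 ≤ bseq k := by
  intro k
  induction k with
  | zero => norm_num [bseq]
  | succ k ih => rw [bseq]; omega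

-- cntL from the bracket bounds of the running counter
lemma cnt_from_bounds : ∀ c : Nat, c ≤ 11 → ∀ n : Int,
    (c = 0 ∨ bseq (c - 1) ≤ n) → n < bseq c → cntL bpsLit n = c := by
  intro c hc n h1 h2
  have hb : ∀ k : Nat, k ≤ 11 → bseq k = bpsLit.getD k 1398102 := by decide
  have h1' : c = 0 ∨ bpsLit.getD (c - 1) 1398102 ≤ n := by
    rcases h1 with h | h
    · exact Or.inl h
    · exact Or.inr (by rw [← hb (c - 1) (by omega)]; exact h)
  have h2' : n < bpsLit.getD c 1398102 := by rw [← hb c hc]; exact h2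
  clear h1 h2 hb
  simp only [cntL, bpsLit, List.map_cons, List.map_nil, List.sum_cons, List.sum_nil]
  interval_cases c <;> simp only [bpsLit, List.getD] at h1' h2' <;>
    norm_num at h1' h2' ⊢ <;> omega

-- ----- A-side invariant -----

def initTables : Array Int × Array Int := (Array.replicate 1000001 0, Array.replicate 1000001 0)

def build (n : Nat) : Array Int × Array Int :=
  (PySem.List.pyRange 1 (1 + (n : Int)) 1).foldl solveStep initTables

lemma pyArrGet_of_some {a : Array Int} {k : Nat} {v : Int} (h : a[k]? = some v) :
    pyArrGet a (k : Int) = v := by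
  have hk : k < a.size := by
    by_contra hk
    rw [Array.getElem?_eq_none (by omega)] at h; cases h
  have hv : a[k] = v := by
    rw [Array.getElem?_eq_getElem hk] at h; exact Option.some.inj h
  have hneg : ¬ ((k : Int) < 0) := by omega
  simp only [pyArrGet, hneg, if_false]
  rw [if_pos ⟨by omega, by exact_mod_cast hk⟩]
  simpa [Array.getD, hk] using hv

lemma pyArrSet_natCast (a : Array Int) (k : Nat) (v : Int) :
    pyArrSet a (k : Int) v = a.setIfInBounds k v := by
  have hneg : ¬ ((k : Int) < 0) := by omega
  simp [pyArrSet, hneg]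

lemma buildInv : ∀ n : Nat, n ≤ 1000000 →
    (build n).1.size = 1000001 ∧ (build n).2.size = 1000001 ∧
    ∀ i : Nat, i ≤ n → (build n).1[i]? = some (stepsF i) ∧ (build n).2[i]? = some (prefF i) := by
  intro n
  induction n with
  | zero =>
      intro _
      have h0 : build 0 = initTables := by
        rw [build, PySem.List.pyRange_one_eq_nil (by norm_num)]; rfl
      rw [h0]
      refine ⟨by simp [initTables], by simp [initTables], ?_⟩
      intro i hi
      interval_cases i
      rw [stepsF]
      simp [initTables, prefF]
  | succ n ih =>
      intro hn
      obtain ⟨hs1, hs2, hc⟩ := ih (by omega)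
      have hstep : build (n + 1) = solveStep (build n) (1 + (n : Int)) := by
        rw [build, show 1 + ((n + 1 : Nat) : Int) = (1 + (n : Int)) + 1 by push_cast; ring,
            PySem.List.pyRange_one_succ_right (by omega), List.foldl_append]
        rfl
      have hxn : (1 + (n : Int)) = ((n + 1 : Nat) : Int) := by push_cast; ring
      have hdiv : PySem.Int.floordiv ((1 + (n : Int)) + 2) 4 = (((n + 3) / 4 : Nat) : Int) := by
        rw [PySem.Int.floordiv_eq_ediv_of_pos (by norm_num)]; omega
      have hdle : (n + 3) / 4 ≤ n := by omega
      have hsv : pyArrGet (build n).1 (((n + 3) / 4 : Nat) : Int) = stepsF ((n + 3) / 4) :=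
        pyArrGet_of_some (hc _ hdle).1
      have hpv : pyArrGet (build n).2 ((n : Nat) : Int) = prefF n :=
        pyArrGet_of_some (hc n (by omega)).2
      have hstepsF : stepsF ((n + 3) / 4) + 1 = stepsF (n + 1) := by
        conv_rhs => rw [stepsF]
        rw [if_neg (Nat.succ_ne_zero n), show (n + 1 + 2) / 4 = (n + 3) / 4 from by omega]
      have hset1 : (build (n + 1)).1 = (build n).1.setIfInBounds (n + 1) (stepsF (n + 1)) := by
        rw [hstep]
        show pyArrSet (build n).1 (1 + (n : Int))
            (pyArrGet (build n).1 (PySem.Int.floordiv ((1 + (n : Int)) + 2) 4) + 1) = _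
        rw [hdiv, hsv, hstepsF, hxn, pyArrSet_natCast]
      have hget1 : pyArrGet ((build n).1.setIfInBounds (n + 1) (stepsF (n + 1))) (1 + (n : Int)) =
          stepsF (n + 1) := by
        rw [hxn]
        refine pyArrGet_of_some ?_
        rw [Array.getElem?_setIfInBounds]
        simp [hs1]
        omega
      have hset2 : (build (n + 1)).2 = (build n).2.setIfInBounds (n + 1) (prefF (n + 1)) := by
        rw [hstep]
        show pyArrSet (build n).2 (1 + (n : Int)) (pyArrGet (build n).2 ((1 + (n:Int)) - 1) +
              pyArrGet (pyArrSet (build n).1 (1 + (n : Int))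
                (pyArrGet (build n).1 (PySem.Int.floordiv ((1 + (n : Int)) + 2) 4) + 1))
                (1 + (n : Int)) + 1) = _
        have hback : pyArrSet (build n).1 (1 + (n : Int))
            (pyArrGet (build n).1 (PySem.Int.floordiv ((1 + (n : Int)) + 2) 4) + 1) =
            (build n).1.setIfInBounds (n + 1) (stepsF (n + 1)) := by
          rw [hdiv, hsv, hstepsF, hxn, pyArrSet_natCast]
        rw [hback, hget1, show (1 + (n : Int)) - 1 = ((n : Nat) : Int) by ring, hpv,
            hxn, pyArrSet_natCast]
        rfl
      refine ⟨by rw [hset1]; simp [Array.size_setIfInBounds, hs1],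
              by rw [hset2]; simp [Array.size_setIfInBounds, hs2], ?_⟩
      intro i hi
      rw [hset1, hset2, Array.getElem?_setIfInBounds, Array.getElem?_setIfInBounds]
      by_cases hieq : n + 1 = i
      · subst hieq
        simp [hs1, hs2]; omega
      · rw [if_neg hieq, if_neg hieq]
        exact hc i (by omega)

-- ----- B-side invariant -----

def initB : Array Int × Int × Int × Int := (Array.replicate 1000001 0, 0, 1, 0)

def buildB (n : Nat) : Array Int × Int × Int × Int :=
  (PySem.List.pyRange 1 (1 + (n : Int)) 1).foldl altStep initB

lemma buildBInv : ∀ n : Nat, n ≤ 1000000 →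
    (buildB n).1.size = 1000001 ∧
    (∀ i : Nat, i ≤ n → (buildB n).1[i]? = some (prefF i)) ∧
    ∃ c : Nat, c ≤ 11 ∧ (buildB n).2.1 = (c : Int) ∧ (buildB n).2.2.1 = bseq c ∧
      (c = 0 ∨ bseq (c - 1) ≤ (n : Int)) ∧ (n : Int) < bseq c ∧ (buildB n).2.2.2 = prefF n := by
  intro n
  induction n with
  | zero =>
      intro _
      have h0 : buildB 0 = initB := by
        rw [buildB, PySem.List.pyRange_one_eq_nil (by norm_num)]; rfl
      rw [h0]
      refine ⟨by simp [initB], ?_, 0, by norm_num, by simp [initB], by simp [initB, bseq], Or.inl rfl, by simp [bseq], by simp [initB, prefF]⟩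
      intro i hi
      interval_cases i
      simp [initB, prefF]
  | succ n ih =>
      intro hn
      obtain ⟨hbs, hbc, c, hc11, hcount, hnext, hlow, hhigh, hacc⟩ := ih (by omega)
      have hstep : buildB (n + 1) = altStep (buildB n) (1 + (n : Int)) := by
        rw [buildB, show 1 + ((n + 1 : Nat) : Int) = (1 + (n : Int)) + 1 by push_cast; ring,
            PySem.List.pyRange_one_succ_right (by omega), List.foldl_append]
        rfl
      have hxn : (1 + (n : Int)) = ((n + 1 : Nat) : Int) := by push_cast; ring
      have heta : buildB n = ((buildB n).1, (buildB n).2.1, (buildB n).2.2.1, (buildB n).2.2.2) := rfl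
      by_cases hx : (1 + (n : Int)) = bseq c
      · -- the sweep hits the next threshold: count increments
        have hc1 : c + 1 ≤ 11 := by
          rcases Nat.lt_or_ge c 11 with h | h
          · omega
          · exfalso
            have hcv : c = 11 := by omega
            rw [hcv, show bseq 11 = 1398102 by decide] at hx
            omega
        have hcnt : stepsF (n + 1) = ((c + 1 : Nat) : Int) := by
          rw [stepsF_eq_cnt (n + 1) (by omega) (by omega)]
          refine cnt_from_bounds (c + 1) hc1 _ (Or.inr ?_) ?_
          · simp only [Nat.add_sub_cancel]
            push_cast
            omega
          · have := bseq_pos c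
            rw [show bseq (c + 1) = 4 * bseq c - 2 from rfl]
            push_cast
            omega
        have hbeq : ((1 + (n : Int)) == (buildB n).2.2.1) = true := by
          rw [hnext]; exact beq_iff_eq.mpr hx
        have hunf : buildB (n + 1) =
            (pyArrSet (buildB n).1 (1 + (n : Int)) ((buildB n).2.2.2 + ((buildB n).2.1 + 1) + 1),
              (buildB n).2.1 + 1, 4 * (buildB n).2.2.1 - 2,
              (buildB n).2.2.2 + ((buildB n).2.1 + 1) + 1) := by
          rw [hstep]
          conv_lhs => rw [heta]
          simp only [altStep, hbeq, if_true]
        have haccv : (buildB n).2.2.2 + ((buildB n).2.1 + 1) + 1 = prefF (n + 1) := by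
          rw [hacc, hcount, show prefF (n + 1) = prefF n + stepsF (n + 1) + 1 from rfl, hcnt]
          push_cast
          ring
        have hset : (buildB (n + 1)).1 = (buildB n).1.setIfInBounds (n + 1) (prefF (n + 1)) := by
          rw [hunf]
          show pyArrSet (buildB n).1 (1 + (n : Int)) _ = _
          rw [haccv, hxn, pyArrSet_natCast]
        refine ⟨by rw [hset]; simp [Array.size_setIfInBounds, hbs], ?_, c + 1, hc1, ?_, ?_, ?_, ?_, ?_⟩
        · intro i hi
          rw [hset, Array.getElem?_setIfInBounds]
          by_cases hieq : n + 1 = i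
          · subst hieq
            simp [hbs]
            omega
          · rw [if_neg hieq]
            exact hbc i (by omega)
        · rw [hunf]
          show (buildB n).2.1 + 1 = _
          rw [hcount]; push_cast; ring
        · rw [hunf]
          show 4 * (buildB n).2.2.1 - 2 = _
          rw [hnext, show bseq (c + 1) = 4 * bseq c - 2 from rfl]
        · refine Or.inr ?_
          simp only [Nat.add_sub_cancel]
          push_cast
          omega
        · have := bseq_pos c
          rw [show bseq (c + 1) = 4 * bseq c - 2 from rfl]
          push_cast
          omega
        · rw [hunf]
          show (buildB n).2.2.2 + ((buildB n).2.1 + 1) + 1 = _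
          exact haccv
      · -- no threshold at this x: count and next unchanged
        have hc0 : c ≠ 0 := by
          intro hc0
          apply hx
          rw [hc0, show bseq 0 = 1 from rfl]
          have : (n : Int) < 1 := by
            have := hhigh
            rw [hc0, show bseq 0 = 1 from rfl] at this
            exact this
          omega
        have hhigh' : ((n + 1 : Nat) : Int) < bseq c := by
          push_cast
          rcases lt_or_eq_of_le (by omega : (n : Int) + 1 ≤ bseq c) with h | h
          · exact h
          · exact absurd (by omega : (1 + (n : Int)) = bseq c) hx
        have hcnt : stepsF (n + 1) = ((c : Nat) : Int) := by
          rw [stepsF_eq_cnt (n + 1) (by omega) (by omega)]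
          refine cnt_from_bounds c hc11 _ (Or.inr ?_) (by push_cast at hhigh' ⊢; omega)
          rcases hlow with h | h
          · exact absurd h hc0
          · push_cast
            omega
        have hbeq : ((1 + (n : Int)) == (buildB n).2.2.1) = false := by
          rw [hnext]
          exact beq_eq_false_iff_ne.mpr hx
        have hunf : buildB (n + 1) =
            (pyArrSet (buildB n).1 (1 + (n : Int)) ((buildB n).2.2.2 + (buildB n).2.1 + 1),
              (buildB n).2.1, (buildB n).2.2.1,
              (buildB n).2.2.2 + (buildB n).2.1 + 1) := by
          rw [hstep]
          conv_lhs => rw [heta]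
          simp only [altStep, hbeq, if_false, Bool.false_eq_true]
        have haccv : (buildB n).2.2.2 + (buildB n).2.1 + 1 = prefF (n + 1) := by
          rw [hacc, hcount, show prefF (n + 1) = prefF n + stepsF (n + 1) + 1 from rfl, hcnt]
        have hset : (buildB (n + 1)).1 = (buildB n).1.setIfInBounds (n + 1) (prefF (n + 1)) := by
          rw [hunf]
          show pyArrSet (buildB n).1 (1 + (n : Int)) _ = _
          rw [haccv, hxn, pyArrSet_natCast]
        refine ⟨by rw [hset]; simp [Array.size_setIfInBounds, hbs], ?_, c, hc11, ?_, ?_, ?_, hhigh', ?_⟩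
        · intro i hi
          rw [hset, Array.getElem?_setIfInBounds]
          by_cases hieq : n + 1 = i
          · subst hieq
            simp [hbs]
            omega
          · rw [if_neg hieq]
            exact hbc i (by omega)
        · rw [hunf]
          show (buildB n).2.1 = _
          exact hcount
        · rw [hunf]
          show (buildB n).2.2.1 = _
          exact hnext
        · refine Or.inr ?_
          rcases hlow with h | h
          · exact absurd h hc0
          · push_cast
            omega
        · rw [hunf]
          show (buildB n).2.2.2 + (buildB n).2.1 + 1 = _
          exact haccv

lemma tables_eq : (build 1000000).2 = (buildB 1000000).1 := by
  obtain ⟨_, hs2, hc⟩ := buildInv 1000000 (by norm_num)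
  obtain ⟨hbs, hbc, _⟩ := buildBInv 1000000 (by norm_num)
  apply Array.ext
  · rw [hs2, hbs]
  · intro i h1 h2
    rw [hs2] at h1
    have hA := (hc i (by omega)).2
    have hB := hbc i (by omega)
    rw [Array.getElem?_eq_getElem (by omega : i < (build 1000000).2.size)] at hA
    rw [Array.getElem?_eq_getElem (by rw [hbs]; omega : i < (buildB 1000000).1.size)] at hB
    rw [Option.some.inj hA, Option.some.inj hB]

-- ===== VERDICT (by name: the statement is the Claim_ definition above) =====
theorem solve_spec : Claim_equal_solve := by
  intro Q Queries hdom hpre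
  unfold Spec_solve
  simp only [solve, solve_alt]
  have hrangeA : (PySem.List.pyRange 1 (10 ^ 6 + 1) 1).foldl solveStep
      (Array.replicate 1000001 0, Array.replicate 1000001 0) = build 1000000 := by
    rw [build, initTables]
    norm_num
  have hrangeB : (PySem.List.pyRange 1 (10 ^ 6 + 1) 1).foldl altStep
      (Array.replicate 1000001 0, 0, 1, 0) = buildB 1000000 := by
    rw [buildB, initB]
    norm_num
  rw [hrangeA, hrangeB, PySem.List.foldl_append_singleton_eq_map, List.nil_append, tables_eq]
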